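-- pv_equiv track=rewrite | github.com/MrWQ/linkSpider | changeLink.py | changeLink2
-- ===== SOURCE A (Python) =====
-- def removeNull(urlList):
--     urlList = list(urlList)
--     if urlList != []:
--         while '' in urlList:
--             urlList.remove('')
--
-- def changeLink2(urlList,url,head,name):
--     headList2 = []  # 用来记录索引位置到末尾到距离    /开头的链接  /favicon.ico 的加头和域名
--     length = len(urlList)
--     count = 0
--     for count in range(0, length):
--         if (urlList[count][0] == '/' and urlList[count][1] != '/'):  # /开头的链接
--             headList2.append(length - count)  # 记录当前索引位置到末尾到距离
--             count = count + 1
--         else: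
--             count = count + 1
--     #    /开头的转换
--     for i in headList2:
--         i = int(i)
--         length = len(urlList)
--
--         temp = urlList[length - i]
--         urlList[length - i] = head + '//' + name + temp
--     removeNull(urlList)  # 去掉空值
--     return urlList
-- ===== SOURCE B (Python) =====
-- def changeLink2(urlList, url, head, name):
--     for i in range(len(urlList)):
--         s = urlList[i]
--         if s[0] == '/' and s[1] != '/':
--             urlList[i] = head + '//' + name + s
--     return urlList
-- ===== Notes on version B (the rewrite author's own statement) =====
-- stated objective: simpler
-- what changed: B drops A's two-pass scheme (collect end-distances into headList2, then a second loop translating each distance back to an index and rewriting) and the no-op removeNull call, doing one single in-place pass that rewrites each root-relative element directly.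
import Mathlib
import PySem

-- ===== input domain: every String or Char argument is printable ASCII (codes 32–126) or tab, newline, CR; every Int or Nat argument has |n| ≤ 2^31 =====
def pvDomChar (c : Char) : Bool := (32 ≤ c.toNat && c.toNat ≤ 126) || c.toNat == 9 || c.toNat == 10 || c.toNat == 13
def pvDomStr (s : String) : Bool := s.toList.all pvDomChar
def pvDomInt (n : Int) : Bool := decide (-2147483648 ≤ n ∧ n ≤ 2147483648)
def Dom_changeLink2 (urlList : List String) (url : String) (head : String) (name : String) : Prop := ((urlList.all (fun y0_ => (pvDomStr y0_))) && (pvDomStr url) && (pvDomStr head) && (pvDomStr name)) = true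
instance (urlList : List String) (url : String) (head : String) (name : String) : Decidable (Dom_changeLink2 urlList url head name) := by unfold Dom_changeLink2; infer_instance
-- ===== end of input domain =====

-- B replaces A's two passes (collect end-distances, then rewrite by distance) and its
-- no-op removeNull call with one direct in-place pass; equivalence is about the return
-- value (both Pythons mutate urlList in place identically).

-- ===== PORT A =====
-- Python's `s[0] == '/' and s[1] != '/'`; Pre_ guarantees both indexings are in range,
-- so the ' ' default of the total form is never consulted on admitted inputs.
def pvCond (s : String) : Bool :=
  ((PySem.Str.pyGet? s 0).getD ' ' == '/') && ((PySem.Str.pyGet? s 1).getD ' ' != '/')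

def changeLink2 (urlList : List String) (url : String) (head : String) (name : String) : List String :=
  let length : Int := urlList.length
  -- first loop: record distance-to-end of every match
  let headList2 : List Int :=
    (PySem.List.pyRange 0 length 1).foldl
      (fun acc count =>
        if pvCond (PySem.List.pyGetD urlList count "") then acc ++ [length - count] else acc)
      []
  -- second loop: rewrite urlList[len - i] (int(i) is a no-op, len is unchanged)
  let urlList2 : List String :=
    headList2.foldl
      (fun ul i =>
        let len2 : Int := ul.length
        let temp := PySem.List.pyGetD ul (len2 - i) ""
        PySem.List.pySetD ul (len2 - i) (head ++ "//" ++ name ++ temp))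
      urlList
  -- removeNull rebinds a fresh local copy and never changes the caller's list: no effect
  urlList2

-- ===== PORT B =====
-- Source B's single pass: rewrite each root-relative element in place, keep the rest.
def changeLink2AltGo (head : String) (name : String) : List String → List String
  | [] => []
  | s :: rest =>
      (if pvCond s then head ++ "//" ++ name ++ s else s) :: changeLink2AltGo head name rest

def changeLink2_alt (urlList : List String) (url : String) (head : String) (name : String) : List String :=
  changeLink2AltGo head name urlList

-- ===== PRECONDITION & SPEC =====
-- Pre_ excludes exactly the inputs where both Pythons raise IndexError: an element that is
-- empty (s[0] fails) or that is "/" alone / starts with '/' at length 1 (s[1] fails).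
def Pre_changeLink2 (urlList : List String) (url : String) (head : String) (name : String) : Prop :=
  ∀ s ∈ urlList, s.toList ≠ [] ∧ (s.toList.head? = some '/' → 2 ≤ s.toList.length)
instance (urlList : List String) (url : String) (head : String) (name : String) : Decidable (Pre_changeLink2 urlList url head name) := by unfold Pre_changeLink2; infer_instance

def pvWitness_changeLink2 : List String × String × String × String :=
  (["/favicon.ico", "http://x/a", "//cdn/y", "/p"], "http://x/a", "http:", "x")

def Spec_changeLink2 (urlList : List String) (url : String) (head : String) (name : String) (out : List String) : Prop := out = changeLink2_alt urlList url head name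
instance (urlList : List String) (url : String) (head : String) (name : String) (out : List String) : Decidable (Spec_changeLink2 urlList url head name out) := by unfold Spec_changeLink2; infer_instance

-- ===== CLAIM (what is proved, stated in full; the proofs are below) =====
def Claim_equal_changeLink2 : Prop := ∀ (urlList : List String) (url : String) (head : String) (name : String), Dom_changeLink2 urlList url head name → Pre_changeLink2 urlList url head name → Spec_changeLink2 urlList url head name (changeLink2 urlList url head name)

-- ===== LEMMAS AND PROOFS =====

-- the distances A's first loop collects, characterised structurally (suffix length = len - idx)
def pvDist : List String → List Int
  | [] => []
  | s :: rest => if pvCond s then ((rest.length : Int) + 1) :: pvDist rest else pvDist rest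

theorem pvDist_bounds (L : List String) : ∀ d ∈ pvDist L, 1 ≤ d ∧ d ≤ (L.length : Int) := by
  induction L with
  | nil => simp [pvDist]
  | cons s rest ih =>
      intro d hd
      simp only [pvDist] at hd
      split at hd
      · rcases List.mem_cons.1 hd with h | h
        · subst h; simp only [List.length_cons]; push_cast; omega
        · have := ih d h; simp only [List.length_cons]; push_cast; omega
      · have := ih d hd; simp only [List.length_cons]; push_cast; omega

theorem pvCollect_eq (L : List String) :
    ∀ (m : Nat) (k : Nat) (acc : List Int), L.length - k = m → k ≤ L.length →
    (PySem.List.pyRange (k : Int) (L.length : Int) 1).foldl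
      (fun acc count =>
        if pvCond (PySem.List.pyGetD L count "") then acc ++ [(L.length : Int) - count] else acc)
      acc = acc ++ pvDist (L.drop k) := by
  intro m
  induction m with
  | zero =>
      intro k acc hm hk
      have hk' : k = L.length := by omega
      subst hk'
      rw [PySem.List.pyRange_one_eq_nil (by omega)]
      simp [List.drop_eq_nil_of_le, pvDist]
  | succ n ih =>
      intro k acc hm hk
      have hklt : k < L.length := by omega
      rw [PySem.List.pyRange_one_cons (by exact_mod_cast hklt)]
      have hget : PySem.List.pyGetD L (k : Int) "" = L[k] := by
        simp [PySem.List.pyGetD_natCast, List.getD_eq_getElem?_getD, List.getElem?_eq_getElem hklt]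
      have hdrop : L.drop k = L[k] :: L.drop (k + 1) := List.drop_eq_getElem_cons hklt
      have hcast : ((k : Int) + 1) = ((k + 1 : Nat) : Int) := by push_cast; ring
      simp only [List.foldl_cons, hget, hcast]
      rw [ih (k + 1) _ (by omega) (by omega)]
      rw [hdrop]
      simp only [pvDist]
      have hlen : ((L.drop (k + 1)).length : Int) + 1 = (L.length : Int) - (k : Int) := by
        simp [List.length_drop]; omega
      by_cases hc : pvCond L[k] = true
      · simp [hc]
        omega
      · simp [hc]

theorem pvUpdate_skip (head name : String) (ds : List Int) :
    ∀ (s : String) (rest : List String), (∀ d ∈ ds, 1 ≤ d ∧ d ≤ (rest.length : Int)) →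
    ds.foldl
      (fun ul i =>
        let len2 : Int := ul.length
        let temp := PySem.List.pyGetD ul (len2 - i) ""
        PySem.List.pySetD ul (len2 - i) (head ++ "//" ++ name ++ temp))
      (s :: rest)
    = s :: ds.foldl
      (fun ul i =>
        let len2 : Int := ul.length
        let temp := PySem.List.pyGetD ul (len2 - i) ""
        PySem.List.pySetD ul (len2 - i) (head ++ "//" ++ name ++ temp))
      rest := by
  induction ds with
  | nil => intro s rest _; simp
  | cons d ds ih =>
      intro s rest hb
      obtain ⟨hd1, hd2⟩ := hb d (List.mem_cons_self ..)
      simp only [List.foldl_cons]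
      have hlen : ((s :: rest).length : Int) = (rest.length : Int) + 1 := by
        simp [List.length_cons]
      have hidx : ((s :: rest).length : Int) - d = ((rest.length : Int) - d) + 1 := by
        rw [hlen]; ring
      have hnn : 0 ≤ (rest.length : Int) - d := by omega
      have hlt : ((rest.length : Int) - d).toNat < rest.length := by omega
      have htn : (((rest.length : Int) - d) + 1).toNat = ((rest.length : Int) - d).toNat + 1 := by
        omega
      have hget : PySem.List.pyGetD (s :: rest) (((s :: rest).length : Int) - d) ""
          = PySem.List.pyGetD rest ((rest.length : Int) - d) "" := by
        rw [hidx,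
          PySem.List.pyGetD_eq_getElem (s :: rest) "" (by omega)
            (by simp only [List.length_cons]; push_cast; omega),
          PySem.List.pyGetD_eq_getElem rest "" hnn (by omega)]
        simp [htn]
      have hset : ∀ v, PySem.List.pySetD (s :: rest) (((s :: rest).length : Int) - d) v
          = s :: PySem.List.pySetD rest ((rest.length : Int) - d) v := by
        intro v
        rw [hidx, PySem.List.pySetD_of_nonneg (s :: rest) v (by omega),
          PySem.List.pySetD_of_nonneg rest v hnn]
        simp [htn]
      simp only [hget, hset]
      rw [ih _ _ ?_]
      intro d' hd'
      obtain ⟨h1, h2⟩ := hb d' (List.mem_cons_of_mem _ hd')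
      exact ⟨h1, by rw [PySem.List.length_pySetD]; exact h2⟩

theorem pvFold_eq_altGo (head name : String) (L : List String) :
    (pvDist L).foldl
      (fun ul i =>
        let len2 : Int := ul.length
        let temp := PySem.List.pyGetD ul (len2 - i) ""
        PySem.List.pySetD ul (len2 - i) (head ++ "//" ++ name ++ temp))
      L = changeLink2AltGo head name L := by
  induction L with
  | nil => simp [pvDist, changeLink2AltGo]
  | cons s rest ih =>
      cases hc : pvCond s with
      | true =>
        simp only [pvDist, hc, if_true, List.foldl_cons]
        have hlen : ((s :: rest).length : Int) - ((rest.length : Int) + 1) = 0 := by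
          simp only [List.length_cons]; push_cast; ring
        rw [show (((s :: rest).length : Int)) - ((rest.length : Int) + 1) = 0 from hlen]
        rw [PySem.List.pyGetD_zero_cons,
          PySem.List.pySetD_of_nonneg (s :: rest) _ (le_refl 0)]
        simp only [Int.toNat_zero, List.set_cons_zero]
        rw [pvUpdate_skip head name _ _ _ (pvDist_bounds rest), ih]
        simp [changeLink2AltGo, hc]
      | false =>
        simp only [pvDist, hc, if_false, Bool.false_eq_true]
        rw [pvUpdate_skip head name _ _ _ (pvDist_bounds rest), ih]
        simp [changeLink2AltGo, hc]

-- ===== VERDICT (by name: the statement is the Claim_ definition above) =====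
theorem changeLink2_spec : Claim_equal_changeLink2 := by
  intro urlList url head name _ _
  unfold Spec_changeLink2 changeLink2 changeLink2_alt
  simp only []
  rw [show ((0 : Int) = ((0 : Nat) : Int)) from rfl,
    pvCollect_eq urlList urlList.length 0 [] (by omega) (by omega)]
  simpa using pvFold_eq_altGo head name urlList
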